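-- pv_equiv track=rewrite | github.com/demchenko-eg/OOP | Лабораторна 5/demchenko_5_3_2.py | lire
-- ===== SOURCE A (Python) =====
-- def lire(r):
--     lst = []
--     elem = ''
--     for ch in r:
--         if ch.isdigit() or ch in '/-':
--             elem += ch
--         if ch.isspace():
--             lst.append(elem)
--             elem = ''
--     lst.append(elem)
--     return lst
-- ===== SOURCE B (Python) =====
-- def lire(r):
--     # pass 1: cut into whitespace-delimited raw segments (keeping empty ones)
--     segs = []
--     buf = ''
--     for ch in r:
--         if ch.isspace():
--             segs.append(buf)
--             buf = ''
--         else: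
--             buf += ch
--     segs.append(buf)
--     # pass 2: keep only digit/slash/dash characters in each segment
--     return [''.join(c for c in seg if c.isdigit() or c in '/-') for seg in segs]
-- ===== Notes on version B (the rewrite author's own statement) =====
-- stated objective: alternative
-- what changed: Replaces A's single classify-and-cut loop (which filters characters and splits in one pass over one string accumulator) by two differently-shaped passes: first split the string into raw whitespace-delimited segments, then map a character filter over each segment.
import Mathlib
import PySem

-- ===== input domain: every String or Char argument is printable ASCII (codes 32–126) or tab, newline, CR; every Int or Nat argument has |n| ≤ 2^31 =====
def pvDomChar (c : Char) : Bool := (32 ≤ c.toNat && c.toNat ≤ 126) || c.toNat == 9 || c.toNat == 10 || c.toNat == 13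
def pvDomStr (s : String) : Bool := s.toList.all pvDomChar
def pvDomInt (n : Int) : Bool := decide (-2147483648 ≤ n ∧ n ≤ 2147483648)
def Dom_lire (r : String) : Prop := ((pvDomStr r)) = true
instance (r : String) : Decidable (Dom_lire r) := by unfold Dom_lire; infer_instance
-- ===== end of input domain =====

-- B re-decomposes A's single classify-and-cut loop into two passes (split on whitespace,
-- then filter each raw segment); same cost, different shape ("alternative").

-- a character A keeps: ch.isdigit() or ch in '/-'
def keepChar (c : Char) : Bool := PySem.Chars.isdigit c || c == '/' || c == '-'

-- ===== PORT A =====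
-- A's loop: one pass, filtering characters into `elem` and cutting on whitespace.
def lireLoop : List Char → List String → List Char → List String
  | [], lst, elem => lst ++ [String.ofList elem]
  | ch :: cs, lst, elem =>
    let elem' := if keepChar ch then elem ++ [ch] else elem
    if PySem.Chars.isspace ch then lireLoop cs (lst ++ [String.ofList elem']) []
    else lireLoop cs lst elem'

def lire (r : String) : List String := lireLoop r.toList [] []

-- ===== PORT B =====
-- pass 1 of B: raw whitespace-delimited segments (empty ones kept)
def segLoop : List Char → List (List Char) → List Char → List (List Char)
  | [], segs, buf => segs ++ [buf]
  | ch :: cs, segs, buf =>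
    if PySem.Chars.isspace ch then segLoop cs (segs ++ [buf]) []
    else segLoop cs segs (buf ++ [ch])

-- pass 2 of B: keep only digit/slash/dash characters in each segment
def lire_alt (r : String) : List String :=
  (segLoop r.toList [] []).map (fun seg => String.ofList (seg.filter keepChar))

-- ===== PRECONDITION & SPEC =====
def Spec_lire (r : String) (out : List String) : Prop := out = lire_alt r
instance (r : String) (out : List String) : Decidable (Spec_lire r out) := by unfold Spec_lire; infer_instance

-- ===== CLAIM (what is proved, stated in full; the proofs are below) =====
def Claim_equal_lire : Prop := ∀ (r : String), Dom_lire r → Spec_lire r (lire r)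

-- ===== LEMMAS AND PROOFS =====

-- a kept character is never whitespace (digits and '/', '-' vs. Python's isspace set)
theorem keep_not_space (c : Char) (h : keepChar c = true) : PySem.Chars.isspace c = false := by
  have hd : 45 ≤ c.toNat ∧ c.toNat ≤ 57 := by
    simp only [keepChar, PySem.Chars.isdigit, Bool.or_eq_true, Bool.and_eq_true,
      decide_eq_true_eq, beq_iff_eq] at h
    rcases h with (⟨h1, h2⟩ | h) | h
    · have a1 : ('0' : Char).toNat ≤ c.toNat := Fin.mk_le_mk.mp h1
      have a2 : c.toNat ≤ ('9' : Char).toNat := Fin.mk_le_mk.mp h2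
      have e1 : ('0' : Char).toNat = 48 := by decide
      have e2 : ('9' : Char).toNat = 57 := by decide
      omega
    · subst h; decide
    · subst h; decide
  simp only [PySem.Chars.isspace, Bool.or_eq_false_iff, Bool.and_eq_false_iff,
    decide_eq_false_iff_not]
  omega

theorem segLoop_acc (cs : List Char) : ∀ segs buf,
    segLoop cs segs buf = segs ++ segLoop cs [] buf := by
  induction cs with
  | nil => intro segs buf; simp [segLoop]
  | cons ch cs ih =>
    intro segs buf
    by_cases hsp : PySem.Chars.isspace ch = true
    · simp only [segLoop, hsp, if_true]
      rw [ih (segs ++ [buf])]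
      simp only [List.nil_append]
      rw [ih [buf]]
      simp
    · simp only [segLoop, hsp]
      rw [ih segs, ih []]
      simp

theorem lireLoop_eq (cs : List Char) : ∀ lst buf,
    lireLoop cs lst (buf.filter keepChar)
      = lst ++ (segLoop cs [] buf).map (fun seg => String.ofList (seg.filter keepChar)) := by
  induction cs with
  | nil => intro lst buf; simp [lireLoop, segLoop]
  | cons ch cs ih =>
    intro lst buf
    by_cases hsp : PySem.Chars.isspace ch = true
    · have hk : keepChar ch = false := by
        by_contra hkk
        simp only [Bool.not_eq_false] at hkk
        rw [keep_not_space ch hkk] at hsp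
        exact absurd hsp (by simp)
      simp only [lireLoop, segLoop, hk, hsp, if_true, if_false, Bool.false_eq_true]
      have := ih (lst ++ [String.ofList (buf.filter keepChar)]) []
      simp only [List.filter_nil] at this
      rw [this]
      simp only [List.nil_append]
      rw [segLoop_acc cs [buf] []]
      simp
    · have hfil : ((buf ++ [ch]).filter keepChar)
          = if keepChar ch then buf.filter keepChar ++ [ch] else buf.filter keepChar := by
        by_cases hk : keepChar ch = true <;> simp [List.filter_append, List.filter, hk]
      simp only [lireLoop, segLoop, hsp, if_false, Bool.false_eq_true]
      rw [← hfil, ih lst (buf ++ [ch])]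

-- ===== VERDICT (by name: the statement is the Claim_ definition above) =====
theorem lire_spec : Claim_equal_lire := by
  intro r _
  unfold Spec_lire lire lire_alt
  have := lireLoop_eq r.toList [] []
  simpa using this
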